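-- pv_equiv track=rewrite | github.com/Grimakis/model100-basic-tools-python | src/pack_basic.py | update_line_references
-- ===== SOURCE A (Python) =====
-- def update_line_references(code, line_map):
--     """Update all line number references to new line numbers."""
--     in_string = False
--     result = []
--     i = 0
--
--     while i < len(code):
--         char = code[i]
--
--         if char == '"':
--             in_string = not in_string
--             result.append(char)
--             i += 1
--             continue
--
--         if in_string:
--             result.append(char)
--             i += 1
--             continue
--
--         remaining = code[i:].upper()
--         keyword_found = False
--
--         for keyword in ['GOTO', 'GOSUB', 'THEN', 'ELSE']:
--             if remaining.startswith(keyword):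
--                 result.extend(code[i:i+len(keyword)])
--                 i += len(keyword)
--                 keyword_found = True
--
--                 while i < len(code):
--                     if code[i].isdigit():
--                         num_start = i
--                         while i < len(code) and code[i].isdigit():
--                             i += 1
--
--                         old_line = int(code[num_start:i])
--                         new_line = line_map.get(old_line, old_line)
--                         result.append(str(new_line))
--                     elif code[i] in (',', ' ', '\t'):
--                         result.append(code[i])
--                         i += 1
--                     else:
--                         break
--                 break
--
--         if not keyword_found:
--             result.append(char)
--             i += 1
--
--     return ''.join(result)
-- ===== SOURCE B (Python) =====
-- import re
--
-- _KW = re.compile(r'(?i:GOTO|GOSUB|THEN|ELSE)([0-9, \t]*)')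
-- _NUM = re.compile(r'[0-9]+')
--
--
-- def update_line_references(code, line_map):
--     """Update all line number references to new line numbers."""
--     def fix_run(m):
--         full = m.group(0)
--         run = m.group(1)
--         keyword = full[:len(full) - len(run)]
--
--         def fix_num(d):
--             n = int(d.group(0))
--             return str(line_map.get(n, n))
--
--         return keyword + _NUM.sub(fix_num, run)
--
--     parts = code.split('"')
--     for j in range(0, len(parts), 2):
--         parts[j] = _KW.sub(fix_run, parts[j])
--     return '"'.join(parts)
-- ===== Notes on version B (the rewrite author's own statement) =====
-- stated objective: faster
-- what changed: Replaces the hand-written char-by-char state machine (which re-uppercases the entire remaining suffix at every position) with a split on '"' (even pieces are outside strings, odd pieces kept verbatim) plus one regex substitution (?i:GOTO|GOSUB|THEN|ELSE)([0-9, \t]*) per piece whose replacement re-emits the keyword and maps each digit run through line_map.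
import Mathlib
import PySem

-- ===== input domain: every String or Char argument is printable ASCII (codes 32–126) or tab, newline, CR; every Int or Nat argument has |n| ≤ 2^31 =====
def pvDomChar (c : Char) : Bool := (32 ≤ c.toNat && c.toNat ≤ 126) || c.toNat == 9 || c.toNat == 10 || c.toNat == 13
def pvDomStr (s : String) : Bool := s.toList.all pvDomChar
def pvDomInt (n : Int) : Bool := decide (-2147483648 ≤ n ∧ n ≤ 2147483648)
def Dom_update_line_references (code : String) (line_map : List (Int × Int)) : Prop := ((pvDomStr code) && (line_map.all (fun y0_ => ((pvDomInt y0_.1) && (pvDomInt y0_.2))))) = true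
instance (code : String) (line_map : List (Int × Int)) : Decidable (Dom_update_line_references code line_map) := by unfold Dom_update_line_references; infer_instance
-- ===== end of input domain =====

-- B rewrites the same references by splitting on '"' and running a regex-style substitution on the
-- outside-string pieces (objective: faster — A re-uppercases the whole remaining suffix at every position; measured).

-- ===== PORT A =====
-- line_map.get(old_line, old_line)  (line_map is a Python dict)
def pvLineGet (lm : List (Int × Int)) (n : Int) : Int :=
  PySem.Dict.getD (PySem.Dict.ofList lm) n n

-- int(<run of digit characters>)  (the run is nonempty and all digits, so int() never raises)
def pvNumVal (ds : List Char) : Int := (PySem.Int.ofChars? ds).getD 0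

-- code[i] in (',', ' ', '\t')
def pvIsSep (c : Char) : Bool := c == ',' || c == ' ' || c == '\t'

-- the inner `while i < len(code)` loop after a keyword: returns (appended output, remaining code);
-- the char-by-char digit scan `while … isdigit()` plus slice is written as takeWhile/dropWhile
def pvConsumeA (lm : List (Int × Int)) (cs : List Char) : List Char × List Char :=
  match cs with
  | [] => ([], [])
  | c :: rest =>
    if h : PySem.Chars.isdigit c then
      let run := (c :: rest).takeWhile PySem.Chars.isdigit
      let out := pvConsumeA lm ((c :: rest).dropWhile PySem.Chars.isdigit)
      (PySem.Int.toChars (pvLineGet lm (pvNumVal run)) ++ out.1, out.2)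
    else if pvIsSep c then
      let out := pvConsumeA lm rest
      (c :: out.1, out.2)
    else ([], c :: rest)
termination_by cs.length
decreasing_by
  · simp only [List.dropWhile_cons, h, if_true, List.length_cons]
    exact Nat.lt_succ_of_le (List.length_dropWhile_le _ _)
  · simp

-- termination helper for pvGoA, cited by name in its decreasing_by
theorem pvConsumeA_snd_length (lm : List (Int × Int)) (cs : List Char) :
    (pvConsumeA lm cs).2.length ≤ cs.length := by
  fun_induction pvConsumeA lm cs with
  | case1 => simp
  | case2 c rest h run out ih =>
      exact le_trans ih (List.length_dropWhile_le _ _)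
  | case3 c rest h hs out ih =>
      exact Nat.le_succ_of_le ih
  | case4 c rest h hs => simp

-- the `for keyword in ['GOTO','GOSUB','THEN','ELSE']: if remaining.startswith(keyword)` chain;
-- returns len(keyword) of the first match
def pvFindKw (up : List Char) : Option Nat :=
  if List.isPrefixOf "GOTO".toList up then some 4
  else if List.isPrefixOf "GOSUB".toList up then some 5
  else if List.isPrefixOf "THEN".toList up then some 4
  else if List.isPrefixOf "ELSE".toList up then some 4
  else none

theorem pvFindKw_pos (up : List Char) (k : Nat) (h : pvFindKw up = some k) : 1 ≤ k := by
  unfold pvFindKw at h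
  split_ifs at h <;> simp_all <;> omega

-- the outer `while i < len(code)` loop; `in_string` is the toggle, cs is code[i:]
def pvGoA (lm : List (Int × Int)) (ins : Bool) (cs : List Char) : List Char :=
  match cs with
  | [] => []
  | c :: rest =>
    if c = '"' then c :: pvGoA lm (!ins) rest
    else if ins then c :: pvGoA lm ins rest
    else
      match h : pvFindKw (PySem.Chars.upper (c :: rest)) with
      | some k =>
        let p := pvConsumeA lm ((c :: rest).drop k)
        (c :: rest).take k ++ p.1 ++ pvGoA lm false p.2
      | none => c :: pvGoA lm false rest
termination_by cs.length
decreasing_by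
  · simp
  · simp
  · calc (pvConsumeA lm ((c :: rest).drop k)).2.length
        ≤ ((c :: rest).drop k).length := pvConsumeA_snd_length _ _
      _ < (c :: rest).length := by
          have hk := pvFindKw_pos _ _ h
          simp only [List.length_drop, List.length_cons]; omega
  · simp

def update_line_references (code : String) (line_map : List (Int × Int)) : String :=
  String.ofList (pvGoA line_map false code.toList)

-- ===== PORT B =====
-- regex character class [0-9]
def pvIsDigitB (c : Char) : Bool := decide ('0' ≤ c) && decide (c ≤ '9')

-- regex character class [0-9, \t]
def pvIsRunB (c : Char) : Bool := pvIsDigitB c || c == ',' || c == ' ' || c == '\t'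

-- the inner re.sub(r'[0-9]+', fix_num, run): leftmost-longest digit runs, mapped through line_map
def pvRewriteRun (lm : List (Int × Int)) (cs : List Char) : List Char :=
  match cs with
  | [] => []
  | c :: r =>
    if h : pvIsDigitB c then
      PySem.Int.toChars (pvLineGet lm (pvNumVal ((c :: r).takeWhile pvIsDigitB)))
        ++ pvRewriteRun lm ((c :: r).dropWhile pvIsDigitB)
    else c :: pvRewriteRun lm r
termination_by cs.length
decreasing_by
  · simp only [List.dropWhile_cons, h, if_true, List.length_cons]
    exact Nat.lt_succ_of_le (List.length_dropWhile_le _ _)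
  · simp

-- the case-insensitive alternation (?i:GOTO|GOSUB|THEN|ELSE) tried at the current position;
-- returns the length of the matched keyword
def pvMatchKw (cs : List Char) : Option Nat :=
  if PySem.Chars.upper (cs.take 4) = "GOTO".toList then some 4
  else if PySem.Chars.upper (cs.take 5) = "GOSUB".toList then some 5
  else if PySem.Chars.upper (cs.take 4) = "THEN".toList then some 4
  else if PySem.Chars.upper (cs.take 4) = "ELSE".toList then some 4
  else none

theorem pvMatchKw_bounds (cs : List Char) (k : Nat) (h : pvMatchKw cs = some k) :
    1 ≤ k ∧ k ≤ cs.length := by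
  unfold pvMatchKw at h
  split_ifs at h with h1 h2 h3 h4
  · injection h with hk; subst hk
    have h5 := congrArg List.length h1
    simp [PySem.Chars.upper] at h5
    exact ⟨by omega, by omega⟩
  · injection h with hk; subst hk
    have h5 := congrArg List.length h2
    simp [PySem.Chars.upper] at h5
    exact ⟨by omega, by omega⟩
  · injection h with hk; subst hk
    have h5 := congrArg List.length h3
    simp [PySem.Chars.upper] at h5
    exact ⟨by omega, by omega⟩
  · injection h with hk; subst hk
    have h5 := congrArg List.length h4
    simp [PySem.Chars.upper] at h5
    exact ⟨by omega, by omega⟩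

-- _KW.sub(fix_run, seg) on one '"'-free piece: scan for the leftmost match, emit the keyword,
-- rewrite its trailing [0-9, \t]* run, continue after the match
def pvProcSeg (lm : List (Int × Int)) (cs : List Char) : List Char :=
  match cs with
  | [] => []
  | c :: rest =>
    match h : pvMatchKw (c :: rest) with
    | some k =>
        (c :: rest).take k
          ++ pvRewriteRun lm (((c :: rest).drop k).takeWhile pvIsRunB)
          ++ pvProcSeg lm (((c :: rest).drop k).dropWhile pvIsRunB)
    | none => c :: pvProcSeg lm rest
termination_by cs.length
decreasing_by
  · calc (((c :: rest).drop k).dropWhile pvIsRunB).length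
        ≤ ((c :: rest).drop k).length := List.length_dropWhile_le _ _
      _ < (c :: rest).length := by
          have hk := (pvMatchKw_bounds _ _ h).1
          simp only [List.length_drop, List.length_cons]; omega
  · simp

-- code.split('"')  (single-character separator)
def pvSplitQ (cs : List Char) : List (List Char) :=
  match cs with
  | [] => [[]]
  | c :: r =>
    if c = '"' then [] :: pvSplitQ r
    else
      match pvSplitQ r with
      | [] => [[c]]
      | p :: ps => (c :: p) :: ps

-- `for j in range(0, len(parts), 2): parts[j] = _KW.sub(fix_run, parts[j])` + '"'.join(parts):
-- the flag tracks even (outside-string) parity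
def pvProcParts (lm : List (Int × Int)) (outside : Bool) (parts : List (List Char)) : List Char :=
  match parts with
  | [] => []
  | [p] => if outside then pvProcSeg lm p else p
  | p :: ps => (if outside then pvProcSeg lm p else p) ++ '"' :: pvProcParts lm (!outside) ps

def update_line_references_alt (code : String) (line_map : List (Int × Int)) : String :=
  String.ofList (pvProcParts line_map true (pvSplitQ code.toList))

-- ===== PRECONDITION & SPEC =====
def Spec_update_line_references (code : String) (line_map : List (Int × Int)) (out : String) : Prop := out = update_line_references_alt code line_map
instance (code : String) (line_map : List (Int × Int)) (out : String) : Decidable (Spec_update_line_references code line_map out) := by unfold Spec_update_line_references; infer_instance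

-- ===== CLAIM (what is proved, stated in full; the proofs are below) =====
def Claim_equal_update_line_references : Prop := ∀ (code : String) (line_map : List (Int × Int)), Dom_update_line_references code line_map → Spec_update_line_references code line_map (update_line_references code line_map)

-- ===== LEMMAS AND PROOFS =====

theorem pv_isdigit_eq (c : Char) : PySem.Chars.isdigit c = pvIsDigitB c := by
  simp [PySem.Chars.isdigit, pvIsDigitB]

theorem pv_takeWhile_takeWhile {d r : Char → Bool} (hdr : ∀ a, d a = true → r a = true)
    (l : List Char) : (l.takeWhile r).takeWhile d = l.takeWhile d := by
  induction l with
  | nil => rfl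
  | cons c t ih =>
      by_cases hd : d c
      · have hr := hdr c hd
        simp [List.takeWhile_cons, hd, hr, ih]
      · by_cases hr : r c <;> simp [List.takeWhile_cons, hd, hr]

theorem pv_dropWhile_takeWhile {d r : Char → Bool} (hdr : ∀ a, d a = true → r a = true)
    (l : List Char) : (l.takeWhile r).dropWhile d = (l.dropWhile d).takeWhile r := by
  induction l with
  | nil => rfl
  | cons c t ih =>
      by_cases hd : d c
      · have hr := hdr c hd
        simp [List.takeWhile_cons, List.dropWhile_cons, hd, hr, ih]
      · by_cases hr : r c <;> simp [List.takeWhile_cons, List.dropWhile_cons, hd, hr]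

theorem pv_dropWhile_dropWhile {d r : Char → Bool} (hdr : ∀ a, d a = true → r a = true)
    (l : List Char) : (l.dropWhile d).dropWhile r = l.dropWhile r := by
  induction l with
  | nil => rfl
  | cons c t ih =>
      by_cases hd : d c
      · have hr := hdr c hd
        simp [List.dropWhile_cons, hd, hr, ih]
      · simp [List.dropWhile_cons, hd]

theorem pv_digit_run (a : Char) (ha : pvIsDigitB a = true) : pvIsRunB a = true := by
  simp [pvIsRunB, ha]

-- the inner loop of A equals "take the [0-9, \t]* run, rewrite it" of B
theorem pv_isdigit_funext : PySem.Chars.isdigit = pvIsDigitB := funext pv_isdigit_eq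

theorem pvRewriteRun_digit (lm : List (Int × Int)) (c : Char) (r : List Char)
    (hd : pvIsDigitB c = true) :
    pvRewriteRun lm (c :: r) =
      PySem.Int.toChars (pvLineGet lm (pvNumVal ((c :: r).takeWhile pvIsDigitB)))
        ++ pvRewriteRun lm ((c :: r).dropWhile pvIsDigitB) := by
  rw [pvRewriteRun]
  simp [hd]

theorem pvRewriteRun_nondigit (lm : List (Int × Int)) (c : Char) (r : List Char)
    (hd : pvIsDigitB c = false) :
    pvRewriteRun lm (c :: r) = c :: pvRewriteRun lm r := by
  rw [pvRewriteRun]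
  simp [hd]

theorem pvConsumeA_eq (lm : List (Int × Int)) (cs : List Char) :
    pvConsumeA lm cs = (pvRewriteRun lm (cs.takeWhile pvIsRunB), cs.dropWhile pvIsRunB) := by
  fun_induction pvConsumeA lm cs with
  | case1 => simp [pvRewriteRun]
  | case2 c rest h run out ih =>
      have hd : pvIsDigitB c = true := pv_isdigit_eq c ▸ h
      have hrun : pvIsRunB c = true := pv_digit_run c hd
      rw [pv_isdigit_funext] at ih
      show (PySem.Int.toChars (pvLineGet lm (pvNumVal
              ((c :: rest).takeWhile PySem.Chars.isdigit)))
              ++ (pvConsumeA lm ((c :: rest).dropWhile PySem.Chars.isdigit)).1,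
            (pvConsumeA lm ((c :: rest).dropWhile PySem.Chars.isdigit)).2) = _
      rw [pv_isdigit_funext, ih]
      have h1 : (List.takeWhile pvIsDigitB (c :: List.takeWhile pvIsRunB rest))
          = List.takeWhile pvIsDigitB (c :: rest) := by
        have h' := pv_takeWhile_takeWhile pv_digit_run (c :: rest)
        rwa [List.takeWhile_cons_of_pos hrun] at h'
      have h2 : (List.dropWhile pvIsDigitB (c :: List.takeWhile pvIsRunB rest))
          = List.takeWhile pvIsRunB (List.dropWhile pvIsDigitB (c :: rest)) := by
        have h' := pv_dropWhile_takeWhile pv_digit_run (c :: rest)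
        rwa [List.takeWhile_cons_of_pos hrun] at h'
      rw [List.takeWhile_cons_of_pos hrun, pvRewriteRun_digit lm c _ hd, h1, h2,
        pv_dropWhile_dropWhile pv_digit_run]
  | case3 c rest h hs out ih =>
      have hd : pvIsDigitB c = false := by have h' := pv_isdigit_eq c; simp_all
      have hrun : pvIsRunB c = true := by
        simp only [pvIsRunB, pvIsSep, Bool.or_eq_true] at hs ⊢
        tauto
      show (c :: (pvConsumeA lm rest).1, (pvConsumeA lm rest).2) = _
      rw [ih, List.takeWhile_cons_of_pos hrun, List.dropWhile_cons_of_pos hrun,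
        pvRewriteRun_nondigit lm c _ hd]
  | case4 c rest h hs =>
      have hd : pvIsDigitB c = false := by have h' := pv_isdigit_eq c; simp_all
      have hrun : pvIsRunB c = false := by
        simp only [pvIsRunB, pvIsSep, Bool.or_eq_true] at hs ⊢
        push_neg at hs
        obtain ⟨⟨ha, hb⟩, hc⟩ := hs
        have ha' : (c == ',') = false := by simpa using ha
        have hb' : (c == ' ') = false := by simpa using hb
        have hc' : (c == '\t') = false := by simpa using hc
        simp [hd, ha', hb', hc']
      have hrun' : ¬ pvIsRunB c = true := by simp [hrun]
      simp [List.takeWhile_cons_of_neg hrun', List.dropWhile_cons_of_neg hrun', pvRewriteRun]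

-- Chars.upper is the character-wise ASCII uppercase map
theorem pv_upper_map (l : List Char) : PySem.Chars.upper l = l.map PySem.Chars.upperChar := by
  simp [PySem.Chars.upper]

-- keyword matching: A's startswith on the uppercased suffix = B's per-keyword comparison,
-- as long as the rest of the input is empty or starts with '"'
theorem pv_kw_branch (kw : List Char) (hq : '"' ∉ kw) (cs t : List Char)
    (ht : t = [] ∨ ∃ t', t = '"' :: t') :
    (List.isPrefixOf kw (PySem.Chars.upper (cs ++ t)) = true) ↔
      PySem.Chars.upper (cs.take kw.length) = kw := by
  rw [List.isPrefixOf_iff_prefix, pv_upper_map, pv_upper_map]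
  constructor
  · intro hpre
    have htake := List.prefix_iff_eq_take.mp hpre
    by_cases hle : kw.length ≤ cs.length
    · rw [List.map_append, List.take_append] at htake
      have hz : kw.length - (cs.map PySem.Chars.upperChar).length = 0 := by
        simp only [List.length_map]; omega
      rw [hz, List.take_zero, List.append_nil, ← List.map_take] at htake
      exact htake.symm
    · exfalso
      push_neg at hle
      rcases ht with rfl | ⟨t', rfl⟩
      · have hl := hpre.length_le
        simp only [List.append_nil, List.length_map] at hl
        omega
      · apply hq
        rw [htake, List.map_append, List.take_append]
        refine List.mem_append.mpr (Or.inr ?_)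
        have hpos : 0 < kw.length - (cs.map PySem.Chars.upperChar).length := by
          simp only [List.length_map]; omega
        obtain ⟨m, hm⟩ := Nat.exists_eq_succ_of_ne_zero (Nat.pos_iff_ne_zero.mp hpos)
        rw [hm, List.map_cons, List.take_succ_cons]
        have : PySem.Chars.upperChar '"' = '"' := by decide
        rw [this]
        exact List.mem_cons_self
  · intro h
    have hlen := congrArg List.length h
    simp only [List.length_map, List.length_take] at hlen
    rw [← h, List.map_take, List.map_append]
    exact ((List.take_prefix _ _).trans (List.prefix_append _ _))

theorem pv_kw_eq (cs t : List Char) (ht : t = [] ∨ ∃ t', t = '"' :: t') :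
    pvFindKw (PySem.Chars.upper (cs ++ t)) = pvMatchKw cs := by
  have h1 := pv_kw_branch "GOTO".toList (by decide) cs t ht
  have h2 := pv_kw_branch "GOSUB".toList (by decide) cs t ht
  have h3 := pv_kw_branch "THEN".toList (by decide) cs t ht
  have h4 := pv_kw_branch "ELSE".toList (by decide) cs t ht
  simp only [show ("GOTO".toList.length) = 4 from rfl] at h1
  simp only [show ("GOSUB".toList.length) = 5 from rfl] at h2
  simp only [show ("THEN".toList.length) = 4 from rfl] at h3
  simp only [show ("ELSE".toList.length) = 4 from rfl] at h4
  unfold pvFindKw pvMatchKw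
  simp only [h1, h2, h3, h4]

-- branch-equation lemmas for the two scanners
theorem pvGoA_nil (lm : List (Int × Int)) (ins : Bool) : pvGoA lm ins [] = [] := by
  rw [pvGoA]

theorem pvGoA_quote (lm : List (Int × Int)) (ins : Bool) (rest : List Char) :
    pvGoA lm ins ('"' :: rest) = '"' :: pvGoA lm (!ins) rest := by
  rw [pvGoA]
  simp

theorem pvGoA_instring (lm : List (Int × Int)) (c : Char) (rest : List Char) (hc : ¬ c = '"') :
    pvGoA lm true (c :: rest) = c :: pvGoA lm true rest := by
  rw [pvGoA]
  simp [hc]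

theorem pvGoA_none (lm : List (Int × Int)) (c : Char) (rest : List Char) (hc : ¬ c = '"')
    (hm : pvFindKw (PySem.Chars.upper (c :: rest)) = none) :
    pvGoA lm false (c :: rest) = c :: pvGoA lm false rest := by
  rw [pvGoA]
  simp only [hc, if_false, Bool.false_eq_true]
  split
  · rename_i k heq; rw [hm] at heq; cases heq
  · rfl

theorem pvGoA_some (lm : List (Int × Int)) (c : Char) (rest : List Char) (k : Nat)
    (hc : ¬ c = '"') (hm : pvFindKw (PySem.Chars.upper (c :: rest)) = some k) :
    pvGoA lm false (c :: rest) =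
      (c :: rest).take k ++ (pvConsumeA lm ((c :: rest).drop k)).1
        ++ pvGoA lm false (pvConsumeA lm ((c :: rest).drop k)).2 := by
  rw [pvGoA]
  simp only [hc, if_false, Bool.false_eq_true]
  split
  · rename_i k' heq; rw [hm] at heq; injection heq with hk; subst hk; rfl
  · rename_i heq; rw [hm] at heq; cases heq

theorem pvProcSeg_none (lm : List (Int × Int)) (c : Char) (rest : List Char)
    (hm : pvMatchKw (c :: rest) = none) :
    pvProcSeg lm (c :: rest) = c :: pvProcSeg lm rest := by
  rw [pvProcSeg]
  split
  · rename_i k heq; rw [hm] at heq; cases heq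
  · rfl

theorem pvProcSeg_some (lm : List (Int × Int)) (c : Char) (rest : List Char) (k : Nat)
    (hm : pvMatchKw (c :: rest) = some k) :
    pvProcSeg lm (c :: rest) =
      (c :: rest).take k
        ++ pvRewriteRun lm (((c :: rest).drop k).takeWhile pvIsRunB)
        ++ pvProcSeg lm (((c :: rest).drop k).dropWhile pvIsRunB) := by
  rw [pvProcSeg]
  split
  · rename_i k' heq; rw [hm] at heq; injection heq with hk; subst hk; rfl
  · rename_i heq; rw [hm] at heq; cases heq

-- takeWhile/dropWhile stop at the '"' that ends an outside-string piece
theorem pv_while_append_q (p : Char → Bool) (hp : p '"' = false) (xs t : List Char)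
    (ht : t = [] ∨ ∃ t', t = '"' :: t') :
    (xs ++ t).takeWhile p = xs.takeWhile p ∧ (xs ++ t).dropWhile p = xs.dropWhile p ++ t := by
  rcases ht with rfl | ⟨t', rfl⟩
  · simp
  · induction xs with
    | nil => simp [List.takeWhile_cons, List.dropWhile_cons, hp]
    | cons c xs ih =>
        by_cases hpc : p c <;>
          simp [List.takeWhile_cons, List.dropWhile_cons, hpc, ih.1, ih.2]

-- A over one outside-string piece = B's per-piece substitution, provided the rest of the
-- input is empty or starts with the closing '"'
theorem pv_seg (lm : List (Int × Int)) (n : Nat) : ∀ (cs t : List Char), cs.length ≤ n →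
    '"' ∉ cs → (t = [] ∨ ∃ t', t = '"' :: t') →
    pvGoA lm false (cs ++ t) = pvProcSeg lm cs ++ pvGoA lm false t := by
  induction n with
  | zero =>
      intro cs t hn hcs ht
      cases cs with
      | nil => simp [pvProcSeg]
      | cons c r => simp at hn
  | succ m ih =>
      intro cs t hn hcs ht
      cases cs with
      | nil => simp [pvProcSeg]
      | cons c r =>
          have hc : ¬ c = '"' := fun h => hcs (h ▸ List.mem_cons_self)
          have hr : '"' ∉ r := fun h => hcs (List.mem_cons_of_mem _ h)
          have hkw := pv_kw_eq (c :: r) t ht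
          rw [List.cons_append] at hkw ⊢
          cases hm : pvMatchKw (c :: r) with
          | none =>
              rw [hm] at hkw
              rw [pvGoA_none lm c (r ++ t) hc hkw, pvProcSeg_none lm c r hm]
              rw [ih r t (by simp only [List.length_cons] at hn; omega) hr ht]
              rfl
          | some k =>
              rw [hm] at hkw
              rw [pvGoA_some lm c (r ++ t) k hc hkw, pvProcSeg_some lm c r k hm]
              obtain ⟨hk1, hk2⟩ := pvMatchKw_bounds (c :: r) k hm
              rw [← List.cons_append]
              have hz : k - (c :: r).length = 0 := by omega
              have h5 : ((c :: r) ++ t).take k = (c :: r).take k := by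
                rw [List.take_append, hz, List.take_zero, List.append_nil]
              have h6 : ((c :: r) ++ t).drop k = (c :: r).drop k ++ t := by
                rw [List.drop_append, hz, List.drop_zero]
              rw [h5, h6, pvConsumeA_eq lm ((c :: r).drop k ++ t)]
              obtain ⟨hw1, hw2⟩ := pv_while_append_q pvIsRunB (by decide) ((c :: r).drop k) t ht
              rw [hw1, hw2]
              have hsub : '"' ∉ ((c :: r).drop k).dropWhile pvIsRunB := fun hmem =>
                hcs (((List.dropWhile_sublist _).trans (List.drop_sublist _ _)).subset hmem)
              have hlen : (((c :: r).drop k).dropWhile pvIsRunB).length ≤ m := by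
                have h7 := List.length_dropWhile_le pvIsRunB ((c :: r).drop k)
                simp only [List.length_drop, List.length_cons] at h7 hn ⊢
                omega
              rw [ih _ t hlen hsub ht]
              simp [List.append_assoc]

-- A inside a string copies verbatim up to the closing quote
theorem pv_inside (lm : List (Int × Int)) (cs t : List Char) (hcs : '"' ∉ cs) :
    pvGoA lm true (cs ++ t) = cs ++ pvGoA lm true t := by
  induction cs with
  | nil => rfl
  | cons c r ih =>
      have hc : ¬ c = '"' := fun h => hcs (h ▸ List.mem_cons_self)
      have hr : '"' ∉ r := fun h => hcs (List.mem_cons_of_mem _ h)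
      rw [List.cons_append, pvGoA_instring lm c (r ++ t) hc, ih hr, List.cons_append]

def pvJoinQ (parts : List (List Char)) : List Char :=
  match parts with
  | [] => []
  | [p] => p
  | p :: ps => p ++ '"' :: pvJoinQ ps

theorem pv_parts (lm : List (Int × Int)) :
    ∀ (parts : List (List Char)) (outside : Bool), (∀ p ∈ parts, '"' ∉ p) →
    pvGoA lm (!outside) (pvJoinQ parts) = pvProcParts lm outside parts := by
  intro parts
  induction parts with
  | nil => intro outside h; cases outside <;> simp [pvJoinQ, pvProcParts, pvGoA_nil]
  | cons p ps ih =>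
      intro outside h
      have hp : '"' ∉ p := h p List.mem_cons_self
      have hps : ∀ q ∈ ps, '"' ∉ q := fun q hq => h q (List.mem_cons_of_mem _ hq)
      cases ps with
      | nil =>
          cases outside with
          | true =>
              show pvGoA lm false (pvJoinQ [p]) = pvProcSeg lm p
              have := pv_seg lm p.length p [] le_rfl hp (Or.inl rfl)
              simpa [pvJoinQ, pvGoA_nil] using this
          | false =>
              show pvGoA lm true (pvJoinQ [p]) = p
              have := pv_inside lm p [] hp
              simpa [pvJoinQ, pvGoA_nil] using this
      | cons q ps' =>
          have hput : pvJoinQ (p :: q :: ps') = p ++ '"' :: pvJoinQ (q :: ps') := rfl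
          cases outside with
          | true =>
              show pvGoA lm false (pvJoinQ (p :: q :: ps')) = _
              rw [hput, pv_seg lm p.length p _ le_rfl hp (Or.inr ⟨_, rfl⟩), pvGoA_quote]
              simp only [Bool.not_false]
              have ihf : pvGoA lm true (pvJoinQ (q :: ps')) = pvProcParts lm false (q :: ps') := by
                simpa using ih false hps
              rw [ihf]
              rfl
          | false =>
              show pvGoA lm true (pvJoinQ (p :: q :: ps')) = _
              rw [hput, pv_inside lm p _ hp, pvGoA_quote]
              simp only [Bool.not_true]
              have iht : pvGoA lm false (pvJoinQ (q :: ps')) = pvProcParts lm true (q :: ps') := by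
                simpa using ih true hps
              rw [iht]
              rfl

theorem pvSplitQ_ne_nil (cs : List Char) : pvSplitQ cs ≠ [] := by
  match cs with
  | [] => simp [pvSplitQ]
  | c :: r =>
      unfold pvSplitQ
      split_ifs <;> [skip; cases h : pvSplitQ r] <;> simp

theorem pvSplitQ_join (cs : List Char) : pvJoinQ (pvSplitQ cs) = cs := by
  induction cs with
  | nil => rfl
  | cons c r ih =>
      by_cases hc : c = '"'
      · subst hc
        simp only [pvSplitQ, if_pos rfl]
        cases hq : pvSplitQ r with
        | nil => exact absurd hq (pvSplitQ_ne_nil r)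
        | cons p ps =>
            rw [hq] at ih
            show pvJoinQ ([] :: p :: ps) = '"' :: r
            rw [show pvJoinQ ([] :: p :: ps) = [] ++ '"' :: pvJoinQ (p :: ps) from rfl]
            rw [ih]
            rfl
      · simp only [pvSplitQ, if_neg hc]
        cases hq : pvSplitQ r with
        | nil => exact absurd hq (pvSplitQ_ne_nil r)
        | cons p ps =>
            rw [hq] at ih
            cases ps with
            | nil => show c :: p = c :: r; rw [show pvJoinQ [p] = p from rfl] at ih; rw [ih]
            | cons p2 ps' =>
                show (c :: p) ++ '"' :: pvJoinQ (p2 :: ps') = c :: r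
                rw [List.cons_append, ← ih]
                rfl

theorem pvSplitQ_no_quote (cs : List Char) : ∀ p ∈ pvSplitQ cs, '"' ∉ p := by
  induction cs with
  | nil => intro p hp; simp [pvSplitQ] at hp; subst hp; simp
  | cons c r ih =>
      intro p hp
      by_cases hc : c = '"'
      · subst hc
        simp only [pvSplitQ, if_pos rfl] at hp
        rcases List.mem_cons.mp hp with rfl | hp'
        · simp
        · exact ih p hp'
      · simp only [pvSplitQ, if_neg hc] at hp
        cases hq : pvSplitQ r with
        | nil => exact absurd hq (pvSplitQ_ne_nil r)
        | cons q qs =>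
            rw [hq] at hp
            rcases List.mem_cons.mp hp with rfl | hp'
            · intro hmem
              rcases List.mem_cons.mp hmem with h' | h'
              · exact hc h'.symm
              · exact ih q (hq ▸ List.mem_cons_self) h'
            · exact ih p (hq ▸ List.mem_cons_of_mem _ hp')

-- ===== VERDICT (by name: the statement is the Claim_ definition above) =====
theorem update_line_references_spec : Claim_equal_update_line_references := by
  intro code lm _
  unfold Spec_update_line_references update_line_references update_line_references_alt
  have h : pvGoA lm false code.toList = pvProcParts lm true (pvSplitQ code.toList) := by
    have h0 := pv_parts lm (pvSplitQ code.toList) true (pvSplitQ_no_quote code.toList)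
    rw [pvSplitQ_join] at h0
    simpa using h0
  exact congrArg String.ofList h
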